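-- pv_equiv track=rewrite | github.com/sooinp/five_weathers | backend/app/services/simulation_runtime.py | generate_terrain_grid
-- ===== SOURCE A (Python) =====
-- def _clone_grid(rows: int, cols: int, fill: int = 0) -> list[list[int]]:
--     return [[fill for _ in range(cols)] for _ in range(rows)]
--
-- def generate_terrain_grid(rows: int, cols: int) -> list[list[int]]:
--     grid = _clone_grid(rows, cols)
--     for r in range(rows):
--         for c in range(cols):
--             if 2 <= r <= min(4, rows - 1) and 4 <= c <= min(6, cols - 1):
--                 grid[r][c] = 1
--             if 6 <= r <= min(8, rows - 1) and 8 <= c <= min(11, cols - 1):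
--                 grid[r][c] = 2
--             if r == min(9, rows - 1) and 2 <= c <= min(5, cols - 1):
--                 grid[r][c] = 1
--             if c == min(13, cols - 1) and 3 <= r <= min(9, rows - 1):
--                 grid[r][c] = 2
--             if (r in (1, 5, min(10, rows - 1)) and 1 <= c <= min(12, cols - 1)) or (
--                 c in (3, 9) and 1 <= r <= min(10, rows - 1)
--             ):
--                 grid[r][c] = 3
--     return grid
-- ===== SOURCE B (Python) =====
-- def generate_terrain_grid(rows: int, cols: int) -> list[list[int]]:
--     grid = [[0 for _ in range(cols)] for _ in range(rows)]
--
--     def paint(r0, r1, c0, c1, v):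
--         # write v into the inclusive box [r0..r1] x [c0..c1], clipped to the grid
--         for r in range(max(r0, 0), min(r1, rows - 1) + 1):
--             for c in range(max(c0, 0), min(c1, cols - 1) + 1):
--                 grid[r][c] = v
--
--     # painted in A's priority order: a later paint wins on overlap
--     paint(2, 4, 4, 6, 1)
--     paint(6, 8, 8, 11, 2)
--     paint(min(9, rows - 1), min(9, rows - 1), 2, 5, 1)
--     paint(3, 9, min(13, cols - 1), min(13, cols - 1), 2)
--     paint(1, 1, 1, 12, 3)
--     paint(5, 5, 1, 12, 3)
--     paint(min(10, rows - 1), min(10, rows - 1), 1, 12, 3)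
--     paint(1, 10, 3, 3, 3)
--     paint(1, 10, 9, 9, 3)
--     return grid
-- ===== Notes on version B (the rewrite author's own statement) =====
-- stated objective: faster
-- what changed: A tests five region conditions at every cell of a rows*cols scan; B allocates the zero grid and paints only the nine fixed clipped feature boxes directly, in A's priority order, so no per-cell condition testing happens.
import Mathlib
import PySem

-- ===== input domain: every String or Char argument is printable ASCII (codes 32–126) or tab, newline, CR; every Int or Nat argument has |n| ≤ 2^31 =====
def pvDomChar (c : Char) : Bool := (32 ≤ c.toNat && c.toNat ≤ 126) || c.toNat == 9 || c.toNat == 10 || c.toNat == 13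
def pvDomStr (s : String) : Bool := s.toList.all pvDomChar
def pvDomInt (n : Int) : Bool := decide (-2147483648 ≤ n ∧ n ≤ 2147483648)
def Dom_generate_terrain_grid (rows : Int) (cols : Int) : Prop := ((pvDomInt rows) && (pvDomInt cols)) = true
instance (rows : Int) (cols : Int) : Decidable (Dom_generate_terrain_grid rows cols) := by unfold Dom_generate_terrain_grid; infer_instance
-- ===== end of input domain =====

-- B replaces A's per-cell scan (five condition tests at every cell) by allocating the zero
-- grid and painting only the nine fixed clipped feature boxes directly, in A's priority order.

-- ===== PORT A =====
-- shared low-level helper: the Lean rendering of the Python statement `grid[r][c] = v`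
-- (r, c are the in-range non-negative loop indices of both programs)
def pvSet2 (g : List (List Int)) (r c : Int) (v : Int) : List (List Int) :=
  g.set r.toNat ((g.getD r.toNat []).set c.toNat v)

-- the body of A's inner loop: the five `if` statements, in source order
def pvCell (rows cols : Int) (g : List (List Int)) (r c : Int) : List (List Int) :=
  let g1 := if 2 ≤ r ∧ r ≤ min 4 (rows-1) ∧ 4 ≤ c ∧ c ≤ min 6 (cols-1) then pvSet2 g r c 1 else g
  let g2 := if 6 ≤ r ∧ r ≤ min 8 (rows-1) ∧ 8 ≤ c ∧ c ≤ min 11 (cols-1) then pvSet2 g1 r c 2 else g1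
  let g3 := if r = min 9 (rows-1) ∧ 2 ≤ c ∧ c ≤ min 5 (cols-1) then pvSet2 g2 r c 1 else g2
  let g4 := if c = min 13 (cols-1) ∧ 3 ≤ r ∧ r ≤ min 9 (rows-1) then pvSet2 g3 r c 2 else g3
  let g5 := if ((r = 1 ∨ r = 5 ∨ r = min 10 (rows-1)) ∧ 1 ≤ c ∧ c ≤ min 12 (cols-1)) ∨
               ((c = 3 ∨ c = 9) ∧ 1 ≤ r ∧ r ≤ min 10 (rows-1)) then pvSet2 g4 r c 3 else g4
  g5

def generate_terrain_grid (rows : Int) (cols : Int) : List (List Int) :=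
  let grid := (PySem.List.pyRange 0 rows 1).map (fun _ => (PySem.List.pyRange 0 cols 1).map (fun _ => (0 : Int)))
  (PySem.List.pyRange 0 rows 1).foldl
    (fun g r => (PySem.List.pyRange 0 cols 1).foldl (fun g c => pvCell rows cols g r c) g) grid

-- ===== PORT B =====
-- Source B's `paint`: write v into the inclusive box [r0..r1] x [c0..c1], clipped to the grid
def pvPaint (rows cols : Int) (g : List (List Int)) (r0 r1 c0 c1 v : Int) : List (List Int) :=
  (PySem.List.pyRange (max r0 0) (min r1 (rows-1) + 1) 1).foldl
    (fun g r => (PySem.List.pyRange (max c0 0) (min c1 (cols-1) + 1) 1).foldl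
      (fun g c => pvSet2 g r c v) g) g

def generate_terrain_grid_alt (rows : Int) (cols : Int) : List (List Int) :=
  let g0 := (PySem.List.pyRange 0 rows 1).map (fun _ => (PySem.List.pyRange 0 cols 1).map (fun _ => (0 : Int)))
  let g1 := pvPaint rows cols g0 2 4 4 6 1
  let g2 := pvPaint rows cols g1 6 8 8 11 2
  let g3 := pvPaint rows cols g2 (min 9 (rows-1)) (min 9 (rows-1)) 2 5 1
  let g4 := pvPaint rows cols g3 3 9 (min 13 (cols-1)) (min 13 (cols-1)) 2
  let g5 := pvPaint rows cols g4 1 1 1 12 3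
  let g6 := pvPaint rows cols g5 5 5 1 12 3
  let g7 := pvPaint rows cols g6 (min 10 (rows-1)) (min 10 (rows-1)) 1 12 3
  let g8 := pvPaint rows cols g7 1 10 3 3 3
  let g9 := pvPaint rows cols g8 1 10 9 9 3
  g9

-- ===== PRECONDITION & SPEC =====
def Spec_generate_terrain_grid (rows : Int) (cols : Int) (out : List (List Int)) : Prop := out = generate_terrain_grid_alt rows cols
instance (rows : Int) (cols : Int) (out : List (List Int)) : Decidable (Spec_generate_terrain_grid rows cols out) := by unfold Spec_generate_terrain_grid; infer_instance

-- ===== CLAIM (what is proved, stated in full; the proofs are below) =====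
def Claim_equal_generate_terrain_grid : Prop := ∀ (rows : Int) (cols : Int), Dom_generate_terrain_grid rows cols → Spec_generate_terrain_grid rows cols (generate_terrain_grid rows cols)

-- ===== LEMMAS AND PROOFS =====

-- cell read, Int indices (both programs only use non-negative in-range indices)
def gget (g : List (List Int)) (r c : Int) : Int := (g.getD r.toNat []).getD c.toNat 0

-- a paint step whose written value depends only on the indices; `none` = no write
def stepW (w : Int → Int → Option Int) (g : List (List Int)) (r c : Int) : List (List Int) :=
  match w r c with
  | some v => pvSet2 g r c v
  | none => g

def paintW (w : Int → Int → Option Int) (R C : List Int) (g : List (List Int)) : List (List Int) :=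
  R.foldl (fun g r => C.foldl (fun g c => stepW w g r c) g) g

-- the common zero grid both programs start from
def zgrid (rows cols : Int) : List (List Int) :=
  (PySem.List.pyRange 0 rows 1).map (fun _ => (PySem.List.pyRange 0 cols 1).map (fun _ => (0 : Int)))

theorem getD_set {α : Type} (l : List α) (i j : Nat) (a d : α) :
    (l.set i a).getD j d = if i = j ∧ i < l.length then a else l.getD j d := by
  simp [List.getD, List.getElem?_set]
  split_ifs <;> simp_all <;> omega

theorem len_pvSet2 (g : List (List Int)) (r c v : Int) : (pvSet2 g r c v).length = g.length := by
  simp [pvSet2]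

theorem rlen_pvSet2 (g : List (List Int)) (r c v : Int) (r' : Int) :
    ((pvSet2 g r c v).getD r'.toNat []).length = (g.getD r'.toNat []).length := by
  rw [pvSet2, getD_set]
  split_ifs with h
  · rw [List.length_set, h.1]
  · rfl

theorem gget_pvSet2 (g : List (List Int)) (r c v r' c' : Int)
    (hr : 0 ≤ r) (hc : 0 ≤ c) (hr' : 0 ≤ r') (hc' : 0 ≤ c') :
    gget (pvSet2 g r c v) r' c' =
      if r' = r ∧ c' = c ∧ r.toNat < g.length ∧ c.toNat < (g.getD r.toNat []).length then v
      else gget g r' c' := by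
  unfold gget pvSet2
  rw [getD_set]
  split_ifs with h1 h2 h2
  · rw [getD_set]
    split_ifs with h3
    · rfl
    · exact absurd ⟨by omega, h2.2.2.2⟩ h3
  · rw [getD_set]
    split_ifs with h3
    · exact absurd ⟨by omega, by omega, h1.2, h3.2⟩ h2
    · rw [h1.1]
  · exact absurd ⟨by omega, h2.2.2.1⟩ h1
  · rfl

theorem len_stepW (w : Int → Int → Option Int) (g : List (List Int)) (r c : Int) :
    (stepW w g r c).length = g.length := by
  unfold stepW; cases w r c <;> simp [len_pvSet2]

theorem rlen_stepW (w : Int → Int → Option Int) (g : List (List Int)) (r c r' : Int) :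
    ((stepW w g r c).getD r'.toNat []).length = (g.getD r'.toNat []).length := by
  unfold stepW
  cases w r c with
  | none => rfl
  | some v => exact rlen_pvSet2 g r c v r'

theorem gget_stepW (w : Int → Int → Option Int) (g : List (List Int)) (rr c r' c' : Int)
    (hrr : 0 ≤ rr) (hc : 0 ≤ c) (hr' : 0 ≤ r') (hc' : 0 ≤ c') :
    gget (stepW w g rr c) r' c' =
      if r' = rr ∧ c' = c ∧ rr.toNat < g.length ∧ c.toNat < (g.getD rr.toNat []).length ∧ (w rr c).isSome
      then (w rr c).getD 0 else gget g r' c' := by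
  unfold stepW
  cases hw : w rr c with
  | none => simp
  | some v =>
    rw [gget_pvSet2 g rr c v r' c' hrr hc hr' hc']
    simp

theorem len_foldC (w : Int → Int → Option Int) (C : List Int) (rr : Int) (g : List (List Int)) :
    (C.foldl (fun g c => stepW w g rr c) g).length = g.length := by
  induction C generalizing g with
  | nil => rfl
  | cons c C ih => simp only [List.foldl_cons]; rw [ih, len_stepW]

theorem rlen_foldC (w : Int → Int → Option Int) (C : List Int) (rr : Int) (g : List (List Int)) (r' : Int) :
    ((C.foldl (fun g c => stepW w g rr c) g).getD r'.toNat []).length = (g.getD r'.toNat []).length := by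
  induction C generalizing g with
  | nil => rfl
  | cons c C ih => simp only [List.foldl_cons]; rw [ih, rlen_stepW]

theorem len_paintW (w : Int → Int → Option Int) (R C : List Int) (g : List (List Int)) :
    (paintW w R C g).length = g.length := by
  induction R generalizing g with
  | nil => rfl
  | cons r R ih => simp only [paintW, List.foldl_cons] at *; rw [ih, len_foldC]

theorem rlen_paintW (w : Int → Int → Option Int) (R C : List Int) (g : List (List Int)) (r' : Int) :
    ((paintW w R C g).getD r'.toNat []).length = (g.getD r'.toNat []).length := by
  induction R generalizing g with
  | nil => rfl
  | cons r R ih => simp only [paintW, List.foldl_cons] at *; rw [ih, rlen_foldC]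

theorem gget_foldC (w : Int → Int → Option Int) (C : List Int) (rr : Int) (g : List (List Int))
    (r' c' : Int) (hC : ∀ x ∈ C, 0 ≤ x) (hrr : 0 ≤ rr) (hr' : 0 ≤ r') (hc' : 0 ≤ c') :
    gget (C.foldl (fun g c => stepW w g rr c) g) r' c' =
      if r' = rr ∧ c' ∈ C ∧ rr.toNat < g.length ∧ c'.toNat < (g.getD rr.toNat []).length ∧ (w rr c').isSome
      then (w rr c').getD 0 else gget g r' c' := by
  induction C generalizing g with
  | nil => simp
  | cons c C ih =>
    simp only [List.foldl_cons]
    rw [ih (stepW w g rr c) (fun x hx => hC x (List.mem_cons_of_mem _ hx)),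
        len_stepW, rlen_stepW, gget_stepW w g rr c r' c' hrr (hC c (List.mem_cons_self)) hr' hc']
    simp only [List.mem_cons]
    split_ifs with hA hD hB hD2 hD3
    · rfl
    · exact absurd ⟨hA.1, Or.inr hA.2.1, hA.2.2⟩ hD
    · obtain ⟨h1, h2, h3⟩ := hB; subst h2; rfl
    · obtain ⟨h1, h2, h3, h4, h5⟩ := hB; subst h2
      exact absurd ⟨h1, Or.inl rfl, h3, h4, h5⟩ hD2
    · obtain ⟨h1, h2, h3, h4, h5⟩ := hD3
      rcases h2 with h | h
      · subst h; exact absurd ⟨h1, rfl, h3, h4, h5⟩ hB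
      · exact absurd ⟨h1, h, h3, h4, h5⟩ hA
    · rfl

theorem gget_paintW (w : Int → Int → Option Int) (R C : List Int) (g : List (List Int))
    (r' c' : Int) (hR : ∀ x ∈ R, 0 ≤ x) (hC : ∀ x ∈ C, 0 ≤ x) (hr' : 0 ≤ r') (hc' : 0 ≤ c') :
    gget (paintW w R C g) r' c' =
      if r' ∈ R ∧ c' ∈ C ∧ r'.toNat < g.length ∧ c'.toNat < (g.getD r'.toNat []).length ∧ (w r' c').isSome
      then (w r' c').getD 0 else gget g r' c' := by
  induction R generalizing g with
  | nil => simp [paintW]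
  | cons r R ih =>
    simp only [paintW, List.foldl_cons] at *
    rw [ih _ (fun x hx => hR x (List.mem_cons_of_mem _ hx)),
        len_foldC, rlen_foldC, gget_foldC w C r g r' c' hC (hR r (List.mem_cons_self)) hr' hc']
    simp only [List.mem_cons]
    split_ifs with hA hD hB hD2 hD3
    · rfl
    · exact absurd ⟨Or.inr hA.1, hA.2⟩ hD
    · obtain ⟨h1, h2⟩ := hB; subst h1; rfl
    · obtain ⟨h1, h2, h3, h4, h5⟩ := hB; subst h1
      exact absurd ⟨Or.inl rfl, h2, h3, h4, h5⟩ hD2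
    · obtain ⟨h1, h2, h3, h4, h5⟩ := hD3
      rcases h1 with h | h
      · subst h; exact absurd ⟨rfl, h2, h3, h4, h5⟩ hB
      · exact absurd ⟨h, h2, h3, h4, h5⟩ hA
    · rfl

-- A's per-cell writer: the last matching condition wins
def wA (rows cols r c : Int) : Option Int :=
  if ((r = 1 ∨ r = 5 ∨ r = min 10 (rows-1)) ∧ 1 ≤ c ∧ c ≤ min 12 (cols-1)) ∨
     ((c = 3 ∨ c = 9) ∧ 1 ≤ r ∧ r ≤ min 10 (rows-1)) then some 3
  else if c = min 13 (cols-1) ∧ 3 ≤ r ∧ r ≤ min 9 (rows-1) then some 2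
  else if r = min 9 (rows-1) ∧ 2 ≤ c ∧ c ≤ min 5 (cols-1) then some 1
  else if 6 ≤ r ∧ r ≤ min 8 (rows-1) ∧ 8 ≤ c ∧ c ≤ min 11 (cols-1) then some 2
  else if 2 ≤ r ∧ r ≤ min 4 (rows-1) ∧ 4 ≤ c ∧ c ≤ min 6 (cols-1) then some 1
  else none

theorem pvSet2_pvSet2 (g : List (List Int)) (r c a b : Int) :
    pvSet2 (pvSet2 g r c a) r c b = pvSet2 g r c b := by
  unfold pvSet2
  rw [getD_set]
  split_ifs with h
  · rw [List.set_set, List.set_set]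
  · have hle : g.length ≤ r.toNat := by omega
    rw [List.set_eq_of_length_le hle, List.set_eq_of_length_le hle]

theorem pvCell_eq_stepW (rows cols : Int) (g : List (List Int)) (r c : Int) :
    pvCell rows cols g r c = stepW (wA rows cols) g r c := by
  unfold pvCell stepW wA
  split_ifs <;> simp [pvSet2_pvSet2]

theorem A_eq_paintW (rows cols : Int) :
    generate_terrain_grid rows cols =
      paintW (wA rows cols) (PySem.List.pyRange 0 rows 1) (PySem.List.pyRange 0 cols 1) (zgrid rows cols) := by
  unfold generate_terrain_grid paintW zgrid
  simp only [pvCell_eq_stepW]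

theorem pvPaint_eq_paintW (rows cols : Int) (g : List (List Int)) (r0 r1 c0 c1 v : Int) :
    pvPaint rows cols g r0 r1 c0 c1 v =
      paintW (fun _ _ => some v) (PySem.List.pyRange (max r0 0) (min r1 (rows-1) + 1) 1)
        (PySem.List.pyRange (max c0 0) (min c1 (cols-1) + 1) 1) g := rfl

-- zero-grid shape and content
theorem len_zgrid (rows cols : Int) : (zgrid rows cols).length = rows.toNat := by
  simp [zgrid, PySem.List.length_pyRange_one]

theorem rlen_zgrid (rows cols : Int) (r : Nat) (h : r < rows.toNat) :
    ((zgrid rows cols).getD r []).length = cols.toNat := by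
  unfold zgrid
  rw [List.getD_eq_getElem _ _ (by simpa [PySem.List.length_pyRange_one] using h)]
  simp [PySem.List.length_pyRange_one]

theorem gget_zgrid (rows cols : Int) (r c : Int) : gget (zgrid rows cols) r c = 0 := by
  unfold gget zgrid
  by_cases h : r.toNat < rows.toNat
  · have hz : ((PySem.List.pyRange 0 rows 1).map
        (fun _ => (PySem.List.pyRange 0 cols 1).map (fun _ => (0:Int)))).getD r.toNat [] =
        (PySem.List.pyRange 0 cols 1).map (fun _ => (0:Int)) := by
      rw [List.getD_eq_getElem _ _
            (by rw [List.length_map, PySem.List.length_pyRange_one]; omega),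
          List.getElem_map]
    rw [hz]
    by_cases h2 : c.toNat < ((PySem.List.pyRange 0 cols 1).map (fun _ => (0:Int))).length
    · rw [List.getD_eq_getElem _ _ h2, List.getElem_map]
    · rw [List.getD_eq_default _ _ (by omega)]
  · have hz : ((PySem.List.pyRange 0 rows 1).map
        (fun _ => (PySem.List.pyRange 0 cols 1).map (fun _ => (0:Int)))).getD r.toNat [] = [] :=
      List.getD_eq_default _ _ (by rw [List.length_map, PySem.List.length_pyRange_one]; omega)
    rw [hz]
    rfl

-- shape of both results
theorem len_A (rows cols : Int) : (generate_terrain_grid rows cols).length = rows.toNat := by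
  rw [A_eq_paintW, len_paintW, len_zgrid]

theorem rlen_A (rows cols : Int) (r : Nat) :
    ((generate_terrain_grid rows cols).getD r []).length = ((zgrid rows cols).getD r []).length := by
  have := rlen_paintW (wA rows cols) (PySem.List.pyRange 0 rows 1) (PySem.List.pyRange 0 cols 1)
      (zgrid rows cols) (r : Int)
  rw [A_eq_paintW]
  simpa using this

theorem len_pvPaint (rows cols : Int) (g : List (List Int)) (r0 r1 c0 c1 v : Int) :
    (pvPaint rows cols g r0 r1 c0 c1 v).length = g.length := by
  rw [pvPaint_eq_paintW, len_paintW]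

theorem rlen_pvPaint (rows cols : Int) (g : List (List Int)) (r0 r1 c0 c1 v : Int) (r : Nat) :
    ((pvPaint rows cols g r0 r1 c0 c1 v).getD r []).length = (g.getD r []).length := by
  have := rlen_paintW (fun _ _ => some v) (PySem.List.pyRange (max r0 0) (min r1 (rows-1) + 1) 1)
      (PySem.List.pyRange (max c0 0) (min c1 (cols-1) + 1) 1) g (r : Int)
  rw [pvPaint_eq_paintW]
  simpa using this

theorem len_B (rows cols : Int) : (generate_terrain_grid_alt rows cols).length = rows.toNat := by
  unfold generate_terrain_grid_alt
  simp only [len_pvPaint]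
  exact len_zgrid rows cols

theorem rlen_B (rows cols : Int) (r : Nat) :
    ((generate_terrain_grid_alt rows cols).getD r []).length = ((zgrid rows cols).getD r []).length := by
  unfold generate_terrain_grid_alt
  simp only [rlen_pvPaint]
  rfl

-- reading one cell of a painted box
theorem gget_pvPaint (rows cols : Int) (g : List (List Int)) (r0 r1 c0 c1 v : Int) (r c : Int)
    (hr0 : 0 ≤ r) (hc0 : 0 ≤ c) :
    gget (pvPaint rows cols g r0 r1 c0 c1 v) r c =
      if max r0 0 ≤ r ∧ r < min r1 (rows-1) + 1 ∧ max c0 0 ≤ c ∧ c < min c1 (cols-1) + 1 ∧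
         r.toNat < g.length ∧ c.toNat < (g.getD r.toNat []).length
      then v else gget g r c := by
  rw [pvPaint_eq_paintW,
      gget_paintW _ _ _ g r c
        (fun x hx => by have := (PySem.List.mem_pyRange_one).mp hx; omega)
        (fun x hx => by have := (PySem.List.mem_pyRange_one).mp hx; omega) hr0 hc0]
  simp only [PySem.List.mem_pyRange_one, Option.isSome_some, Option.getD_some, and_true]
  split_ifs with h1 h2 h2 <;> first | rfl | (exfalso; tauto)

-- the value A writes, as a plain integer
def fA (rows cols r c : Int) : Int :=
  if ((r = 1 ∨ r = 5 ∨ r = min 10 (rows-1)) ∧ 1 ≤ c ∧ c ≤ min 12 (cols-1)) ∨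
     ((c = 3 ∨ c = 9) ∧ 1 ≤ r ∧ r ≤ min 10 (rows-1)) then 3
  else if c = min 13 (cols-1) ∧ 3 ≤ r ∧ r ≤ min 9 (rows-1) then 2
  else if r = min 9 (rows-1) ∧ 2 ≤ c ∧ c ≤ min 5 (cols-1) then 1
  else if 6 ≤ r ∧ r ≤ min 8 (rows-1) ∧ 8 ≤ c ∧ c ≤ min 11 (cols-1) then 2
  else if 2 ≤ r ∧ r ≤ min 4 (rows-1) ∧ 4 ≤ c ∧ c ≤ min 6 (cols-1) then 1
  else 0

theorem wA_getD (rows cols r c : Int) : (wA rows cols r c).getD 0 = fA rows cols r c := by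
  unfold wA fA
  split_ifs <;> rfl

def fB (rows cols r c : Int) : Int :=
  if max 1 0 ≤ r ∧ r < min 10 (rows - 1) + 1 ∧
     max 9 0 ≤ c ∧ c < min 9 (cols - 1) + 1 ∧ r.toNat < rows.toNat ∧ c.toNat < cols.toNat then 3
  else if max 1 0 ≤ r ∧ r < min 10 (rows - 1) + 1 ∧
     max 3 0 ≤ c ∧ c < min 3 (cols - 1) + 1 ∧ r.toNat < rows.toNat ∧ c.toNat < cols.toNat then 3
  else if max (min 10 (rows - 1)) 0 ≤ r ∧ r < min (min 10 (rows - 1)) (rows - 1) + 1 ∧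
     max 1 0 ≤ c ∧ c < min 12 (cols - 1) + 1 ∧ r.toNat < rows.toNat ∧ c.toNat < cols.toNat then 3
  else if max 5 0 ≤ r ∧ r < min 5 (rows - 1) + 1 ∧
     max 1 0 ≤ c ∧ c < min 12 (cols - 1) + 1 ∧ r.toNat < rows.toNat ∧ c.toNat < cols.toNat then 3
  else if max 1 0 ≤ r ∧ r < min 1 (rows - 1) + 1 ∧
     max 1 0 ≤ c ∧ c < min 12 (cols - 1) + 1 ∧ r.toNat < rows.toNat ∧ c.toNat < cols.toNat then 3
  else if max 3 0 ≤ r ∧ r < min 9 (rows - 1) + 1 ∧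
     max (min 13 (cols - 1)) 0 ≤ c ∧ c < min (min 13 (cols - 1)) (cols - 1) + 1 ∧ r.toNat < rows.toNat ∧ c.toNat < cols.toNat then 2
  else if max (min 9 (rows - 1)) 0 ≤ r ∧ r < min (min 9 (rows - 1)) (rows - 1) + 1 ∧
     max 2 0 ≤ c ∧ c < min 5 (cols - 1) + 1 ∧ r.toNat < rows.toNat ∧ c.toNat < cols.toNat then 1
  else if max 6 0 ≤ r ∧ r < min 8 (rows - 1) + 1 ∧
     max 8 0 ≤ c ∧ c < min 11 (cols - 1) + 1 ∧ r.toNat < rows.toNat ∧ c.toNat < cols.toNat then 2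
  else if max 2 0 ≤ r ∧ r < min 4 (rows - 1) + 1 ∧
     max 4 0 ≤ c ∧ c < min 6 (cols - 1) + 1 ∧ r.toNat < rows.toNat ∧ c.toNat < cols.toNat then 1
  else 0

theorem if3 (a b : Prop) [Decidable a] [Decidable b] (x : Int) :
    (if a then (3:Int) else if b then 3 else x) = if a ∨ b then 3 else x := by
  by_cases ha : a <;> by_cases hb : b <;> simp [ha, hb]

set_option maxHeartbeats 1000000 in
theorem fAB (rows cols r c : Int) (hr0 : 0 ≤ r) (hr : r < rows) (hc0 : 0 ≤ c) (hc : c < cols) :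
    fA rows cols r c = fB rows cols r c := by
  unfold fA fB
  rw [if3, if3, if3, if3]
  have E5 : ((((max 1 0 ≤ r ∧ r < min 10 (rows - 1) + 1 ∧
     max 9 0 ≤ c ∧ c < min 9 (cols - 1) + 1 ∧ r.toNat < rows.toNat ∧ c.toNat < cols.toNat) ∨
    (max 1 0 ≤ r ∧ r < min 10 (rows - 1) + 1 ∧
     max 3 0 ≤ c ∧ c < min 3 (cols - 1) + 1 ∧ r.toNat < rows.toNat ∧ c.toNat < cols.toNat)) ∨
    (max (min 10 (rows - 1)) 0 ≤ r ∧ r < min (min 10 (rows - 1)) (rows - 1) + 1 ∧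
     max 1 0 ≤ c ∧ c < min 12 (cols - 1) + 1 ∧ r.toNat < rows.toNat ∧ c.toNat < cols.toNat)) ∨
    (max 5 0 ≤ r ∧ r < min 5 (rows - 1) + 1 ∧
     max 1 0 ≤ c ∧ c < min 12 (cols - 1) + 1 ∧ r.toNat < rows.toNat ∧ c.toNat < cols.toNat)) ∨
    (max 1 0 ≤ r ∧ r < min 1 (rows - 1) + 1 ∧
     max 1 0 ≤ c ∧ c < min 12 (cols - 1) + 1 ∧ r.toNat < rows.toNat ∧ c.toNat < cols.toNat)
    ↔ (((r = 1 ∨ r = 5 ∨ r = min 10 (rows-1)) ∧ 1 ≤ c ∧ c ≤ min 12 (cols-1)) ∨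
     ((c = 3 ∨ c = 9) ∧ 1 ≤ r ∧ r ≤ min 10 (rows-1))) := by omega
  have E4 : (max 3 0 ≤ r ∧ r < min 9 (rows - 1) + 1 ∧
     max (min 13 (cols - 1)) 0 ≤ c ∧ c < min (min 13 (cols - 1)) (cols - 1) + 1 ∧
     r.toNat < rows.toNat ∧ c.toNat < cols.toNat)
    ↔ (c = min 13 (cols-1) ∧ 3 ≤ r ∧ r ≤ min 9 (rows-1)) := by omega
  have E3 : (max (min 9 (rows - 1)) 0 ≤ r ∧ r < min (min 9 (rows - 1)) (rows - 1) + 1 ∧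
     max 2 0 ≤ c ∧ c < min 5 (cols - 1) + 1 ∧ r.toNat < rows.toNat ∧ c.toNat < cols.toNat)
    ↔ (r = min 9 (rows-1) ∧ 2 ≤ c ∧ c ≤ min 5 (cols-1)) := by omega
  have E2 : (max 6 0 ≤ r ∧ r < min 8 (rows - 1) + 1 ∧
     max 8 0 ≤ c ∧ c < min 11 (cols - 1) + 1 ∧ r.toNat < rows.toNat ∧ c.toNat < cols.toNat)
    ↔ (6 ≤ r ∧ r ≤ min 8 (rows-1) ∧ 8 ≤ c ∧ c ≤ min 11 (cols-1)) := by omega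
  have E1 : (max 2 0 ≤ r ∧ r < min 4 (rows - 1) + 1 ∧
     max 4 0 ≤ c ∧ c < min 6 (cols - 1) + 1 ∧ r.toNat < rows.toNat ∧ c.toNat < cols.toNat)
    ↔ (2 ≤ r ∧ r ≤ min 4 (rows-1) ∧ 4 ≤ c ∧ c ≤ min 6 (cols-1)) := by omega
  simp only [E5, E4, E3, E2, E1]

theorem gget_A (rows cols r c : Int) (hr0 : 0 ≤ r) (hr : r < rows) (hc0 : 0 ≤ c) (hc : c < cols) :
    gget (generate_terrain_grid rows cols) r c = fA rows cols r c := by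
  rw [A_eq_paintW,
      gget_paintW _ _ _ _ r c
        (fun x hx => by have := (PySem.List.mem_pyRange_one).mp hx; omega)
        (fun x hx => by have := (PySem.List.mem_pyRange_one).mp hx; omega) hr0 hc0]
  have hm1 : r ∈ PySem.List.pyRange 0 rows 1 := (PySem.List.mem_pyRange_one).mpr ⟨hr0, hr⟩
  have hm2 : c ∈ PySem.List.pyRange 0 cols 1 := (PySem.List.mem_pyRange_one).mpr ⟨hc0, hc⟩
  have hl : r.toNat < (zgrid rows cols).length := by rw [len_zgrid]; omega
  have hrl : c.toNat < ((zgrid rows cols).getD r.toNat []).length := by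
    rw [rlen_zgrid rows cols r.toNat (by omega)]; omega
  by_cases hs : (wA rows cols r c).isSome
  · rw [if_pos ⟨hm1, hm2, hl, hrl, hs⟩, wA_getD]
  · rw [if_neg (by tauto), gget_zgrid, ← wA_getD]
    cases hw : wA rows cols r c
    · rfl
    · rw [hw] at hs; simp at hs

-- the pointwise equality of the two programs on in-range cells
theorem B_eq (rows cols : Int) :
    generate_terrain_grid_alt rows cols =
      pvPaint rows cols (pvPaint rows cols (pvPaint rows cols (pvPaint rows cols (pvPaint rows cols
        (pvPaint rows cols (pvPaint rows cols (pvPaint rows cols (pvPaint rows cols (zgrid rows cols)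
        2 4 4 6 1) 6 8 8 11 2) (min 9 (rows-1)) (min 9 (rows-1)) 2 5 1)
        3 9 (min 13 (cols-1)) (min 13 (cols-1)) 2) 1 1 1 12 3) 5 5 1 12 3)
        (min 10 (rows-1)) (min 10 (rows-1)) 1 12 3) 1 10 3 3 3) 1 10 9 9 3 := rfl

set_option maxHeartbeats 1600000 in
theorem cell_eq (rows cols r c : Int) (hr0 : 0 ≤ r) (hr : r < rows) (hc0 : 0 ≤ c) (hc : c < cols) :
    gget (generate_terrain_grid rows cols) r c = gget (generate_terrain_grid_alt rows cols) r c := by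
  rw [gget_A rows cols r c hr0 hr hc0 hc]
  rw [B_eq]
  rw [gget_pvPaint rows cols _ _ _ _ _ _ r c hr0 hc0]
  rw [gget_pvPaint rows cols _ _ _ _ _ _ r c hr0 hc0]
  rw [gget_pvPaint rows cols _ _ _ _ _ _ r c hr0 hc0]
  rw [gget_pvPaint rows cols _ _ _ _ _ _ r c hr0 hc0]
  rw [gget_pvPaint rows cols _ _ _ _ _ _ r c hr0 hc0]
  rw [gget_pvPaint rows cols _ _ _ _ _ _ r c hr0 hc0]
  rw [gget_pvPaint rows cols _ _ _ _ _ _ r c hr0 hc0]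
  rw [gget_pvPaint rows cols _ _ _ _ _ _ r c hr0 hc0]
  rw [gget_pvPaint rows cols _ _ _ _ _ _ r c hr0 hc0]
  rw [gget_zgrid]
  simp only [len_pvPaint, len_zgrid, rlen_pvPaint]
  rw [rlen_zgrid rows cols r.toNat (by omega)]
  rw [fAB rows cols r c hr0 hr hc0 hc]
  rfl

theorem grid_ext (g1 g2 : List (List Int)) (hlen : g1.length = g2.length)
    (hrow : ∀ r : Nat, (g1.getD r []).length = (g2.getD r []).length)
    (hcell : ∀ r c : Nat, gget g1 (r : Int) (c : Int) = gget g2 (r : Int) (c : Int)) :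
    g1 = g2 := by
  apply List.ext_getElem hlen
  intro n h1 h2
  have hrl : (g1[n]).length = (g2[n]).length := by
    have := hrow n
    rwa [List.getD_eq_getElem _ _ h1, List.getD_eq_getElem _ _ h2] at this
  apply List.ext_getElem hrl
  intro m hm1 hm2
  have := hcell n m
  unfold gget at this
  simp only [Int.toNat_natCast] at this
  rwa [List.getD_eq_getElem _ _ h1, List.getD_eq_getElem _ _ h2,
       List.getD_eq_getElem _ _ hm1, List.getD_eq_getElem _ _ hm2] at this

-- ===== VERDICT (by name: the statement is the Claim_ definition above) =====
theorem generate_terrain_grid_spec : Claim_equal_generate_terrain_grid := by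
  intro rows cols _
  unfold Spec_generate_terrain_grid
  apply grid_ext
  · rw [len_A, len_B]
  · intro r
    rw [rlen_A, rlen_B]
  · intro r c
    by_cases hr : r < rows.toNat
    · by_cases hc : c < cols.toNat
      · exact cell_eq rows cols r c (by omega) (by omega) (by omega) (by omega)
      · -- column out of range: both rows have length cols.toNat, read returns the default 0
        unfold gget
        rw [List.getD_eq_default, List.getD_eq_default]
        · simp only [Int.toNat_natCast]
          rw [rlen_B rows cols r, rlen_zgrid rows cols r hr]
          omega
        · simp only [Int.toNat_natCast]
          rw [rlen_A rows cols r, rlen_zgrid rows cols r hr]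
          omega
    · -- row out of range: both reads return the default
      unfold gget
      rw [List.getD_eq_default (l := generate_terrain_grid rows cols),
          List.getD_eq_default (l := generate_terrain_grid_alt rows cols)]
      · simp only [Int.toNat_natCast]
        rw [len_B]
        omega
      · simp only [Int.toNat_natCast]
        rw [len_A]
        omega
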